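-- pv_equiv track=rewrite | github.com/socathie/CodeFights | Arcade/SpringOfIntegration/ArrayPreviousLess.py | arrayPreviousLess
-- ===== SOURCE A (Python) =====
-- def arrayPreviousLess(items):
--     array = []
--     for i in range(0,len(items)):
--         pos = -1
--         for j in range(0,i):
--             if items[j]<items[i]:
--                 pos = j
--         if pos == -1:
--             array.append(-1)
--         else:
--             array.append(items[pos])
--     return array
-- ===== SOURCE B (Python) =====
-- def arrayPreviousLess(items):
--     res = []
--     stack = []  # strictly increasing from bottom; top = last element with no smaller-or-equal element after it
--     for x in items:
--         while stack and stack[-1] >= x: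
--             stack.pop()
--         res.append(stack[-1] if stack else -1)
--         stack.append(x)
--     return res
-- ===== Notes on version B (the rewrite author's own statement) =====
-- stated objective: faster
-- what changed: Replaces the quadratic inner rescan of the whole prefix with a monotonic stack: each element is pushed and popped at most once, yielding one linear pass.
import Mathlib
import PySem

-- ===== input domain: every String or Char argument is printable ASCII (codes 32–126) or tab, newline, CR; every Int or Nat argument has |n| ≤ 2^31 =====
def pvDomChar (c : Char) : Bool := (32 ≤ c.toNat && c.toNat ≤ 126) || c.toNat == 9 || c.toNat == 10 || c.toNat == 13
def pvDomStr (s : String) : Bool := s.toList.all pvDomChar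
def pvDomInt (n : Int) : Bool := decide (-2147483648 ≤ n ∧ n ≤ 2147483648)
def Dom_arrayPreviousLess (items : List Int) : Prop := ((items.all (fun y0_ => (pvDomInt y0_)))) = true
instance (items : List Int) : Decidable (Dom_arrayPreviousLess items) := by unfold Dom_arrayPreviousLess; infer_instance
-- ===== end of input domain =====

-- B replaces A's quadratic rescan of each prefix with a one-pass monotonic stack (asymptotically faster).

-- ===== PORT A =====
-- literal port: for each i, rescan j in range(0,i) keeping the last j with items[j] < items[i]
-- (indices produced by the ranges are always in bounds, so `getD _ 0` is Python's items[_] exactly)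
def arrayPreviousLess (items : List Int) : List Int :=
  (List.range items.length).foldl
    (fun array i =>
      let pos : Int :=
        (List.range i).foldl
          (fun pos j => if items.getD j 0 < items.getD i 0 then (j : Int) else pos) (-1)
      if pos = -1 then array ++ [(-1 : Int)] else array ++ [items.getD pos.toNat 0])
    []

-- ===== PORT B =====
-- literal port of Source B: stack kept head-is-top; the while-pop loop is dropWhile
def arrayPreviousLess_alt (items : List Int) : List Int :=
  (items.foldl
    (fun (st : List Int × List Int) x =>
      let s := st.2.dropWhile (fun t => x ≤ t)
      (st.1 ++ [match s with | [] => (-1 : Int) | t :: _ => t], x :: s))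
    ([], [])).1

-- ===== PRECONDITION & SPEC =====
def Spec_arrayPreviousLess (items : List Int) (out : List Int) : Prop := out = arrayPreviousLess_alt items
instance (items : List Int) (out : List Int) : Decidable (Spec_arrayPreviousLess items out) := by unfold Spec_arrayPreviousLess; infer_instance

-- ===== CLAIM (what is proved, stated in full; the proofs are below) =====
def Claim_equal_arrayPreviousLess : Prop := ∀ (items : List Int), Dom_arrayPreviousLess items → Spec_arrayPreviousLess items (arrayPreviousLess items)

-- ===== LEMMAS AND PROOFS =====

-- reference value: nearest element < x in rp (rp = reversed prefix), else -1
def pvG (rp : List Int) (x : Int) : Int := (rp.dropWhile (fun t => x ≤ t)).headD (-1)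

-- reference function both ports are reduced to
def pvF (rp : List Int) : List Int → List Int
  | [] => []
  | x :: rest => pvG rp x :: pvF (x :: rp) rest

-- A's inner loop over range i
def pvFold (items : List Int) (v : Int) (i : Nat) : Int :=
  (List.range i).foldl (fun pos j => if items.getD j 0 < v then (j : Int) else pos) (-1)

-- A's per-index value
def pvH (items : List Int) (i : Nat) : Int :=
  if pvFold items (items.getD i 0) i = -1 then (-1 : Int)
  else items.getD (pvFold items (items.getD i 0) i).toNat 0

theorem pvFoldlApp {α : Type} (f : α → Int) :
    ∀ (l : List α) (init : List Int),
      l.foldl (fun acc x => acc ++ [f x]) init = init ++ l.map f := by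
  intro l
  induction l with
  | nil => simp
  | cons a t ih => intro init; simp [ih]

theorem pvA_eq_map (items : List Int) :
    arrayPreviousLess items = (List.range items.length).map (pvH items) := by
  unfold arrayPreviousLess
  have hstep :
      (fun (array : List Int) (i : Nat) =>
        let pos : Int :=
          (List.range i).foldl
            (fun pos j => if items.getD j 0 < items.getD i 0 then (j : Int) else pos) (-1)
        if pos = -1 then array ++ [(-1 : Int)] else array ++ [items.getD pos.toNat 0])
      = (fun (array : List Int) (i : Nat) => array ++ [pvH items i]) := by
    funext a i
    show (if pvFold items (items.getD i 0) i = -1 then a ++ [(-1 : Int)]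
          else a ++ [items.getD (pvFold items (items.getD i 0) i).toNat 0])
        = a ++ [pvH items i]
    unfold pvH
    split <;> simp_all
  rw [hstep, pvFoldlApp]
  simp

theorem pvA_inner (items : List Int) (v : Int) :
    ∀ i : Nat, i ≤ items.length →
      (if pvFold items v i = -1 then (-1 : Int) else items.getD (pvFold items v i).toNat 0)
      = pvG ((items.take i).reverse) v := by
  intro i
  induction i with
  | zero => intro _; simp [pvFold, pvG]
  | succ n ih =>
    intro hle
    have hn : n < items.length := by omega
    have hget : items.getD n 0 = items[n] := List.getD_eq_getElem items 0 hn
    have htake : (items.take (n + 1)).reverse = items[n] :: (items.take n).reverse := by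
      rw [List.take_add_one]
      simp [List.getElem?_eq_getElem hn]
    have hfold : pvFold items v (n + 1)
        = if items.getD n 0 < v then (n : Int) else pvFold items v n := by
      unfold pvFold
      rw [List.range_succ, List.foldl_append]
      simp
    rw [htake, hfold]
    by_cases h : items.getD n 0 < v
    · rw [if_pos h]
      have hne : ((n : Int)) ≠ -1 := by omega
      rw [if_neg hne]
      have hnot : ¬ v ≤ items[n] := by rw [← hget]; omega
      simp [pvG, hnot, List.getElem?_eq_getElem hn]
    · have hyes : v ≤ items[n] := by rw [← hget]; omega
      simp only [h, if_false]
      rw [ih (by omega)]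
      simp [pvG, hyes]

theorem pvMapRange (l : List Int) :
    ∀ rp : List Int,
      (List.range l.length).map (fun i => pvG ((l.take i).reverse ++ rp) (l.getD i 0)) = pvF rp l := by
  induction l with
  | nil => intro rp; simp [pvF]
  | cons x t ih =>
    intro rp
    rw [List.length_cons, List.range_succ_eq_map, List.map_cons, List.map_map]
    have h0 : pvG (((x :: t).take 0).reverse ++ rp) ((x :: t).getD 0 0) = pvG rp x := by simp
    have hrest :
        (List.range t.length).map
          ((fun i => pvG (((x :: t).take i).reverse ++ rp) ((x :: t).getD i 0)) ∘ Nat.succ)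
        = (List.range t.length).map (fun i => pvG ((t.take i).reverse ++ (x :: rp)) (t.getD i 0)) := by
      apply List.map_congr_left
      intro i _
      simp [List.take_succ_cons, List.append_assoc]
    rw [h0, hrest, ih (x :: rp)]
    rfl

theorem pvDropDrop (x y : Int) (h : y ≤ x) (l : List Int) :
    (l.dropWhile (fun t => x ≤ t)).dropWhile (fun t => y ≤ t) = l.dropWhile (fun t => y ≤ t) := by
  induction l with
  | nil => simp
  | cons a l ih =>
    by_cases hxa : x ≤ a
    · have hya : y ≤ a := le_trans h hxa
      simp [hxa, hya, ih]
    · simp [hxa]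

def pvInv (stack rp : List Int) : Prop :=
  ∀ x : Int, (stack.dropWhile (fun t => x ≤ t)).head? = (rp.dropWhile (fun t => x ≤ t)).head?

theorem pvInvStep {stack rp : List Int} (h : pvInv stack rp) (x : Int) :
    pvInv (x :: stack.dropWhile (fun t => x ≤ t)) (x :: rp) := by
  intro y
  by_cases hy : y ≤ x
  · simp [hy, pvDropDrop x y hy, h y]
  · simp [hy]

theorem pvMatchHead (l : List Int) :
    (match l with | [] => (-1 : Int) | t :: _ => t) = l.head?.getD (-1) := by
  cases l <;> rfl

theorem pvB_foldl (rest : List Int) :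
    ∀ (acc stack rp : List Int), pvInv stack rp →
      (rest.foldl
        (fun (st : List Int × List Int) x =>
          let s := st.2.dropWhile (fun t => x ≤ t)
          (st.1 ++ [match s with | [] => (-1 : Int) | t :: _ => t], x :: s))
        (acc, stack)).1 = acc ++ pvF rp rest := by
  induction rest with
  | nil => intro acc stack rp _; simp [pvF]
  | cons x r ih =>
    intro acc stack rp hinv
    have he : (match stack.dropWhile (fun t => x ≤ t) with | [] => (-1 : Int) | t :: _ => t)
        = pvG rp x := by
      rw [pvMatchHead, hinv x, pvG, List.headD_eq_head?_getD]
    show (r.foldl _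
        (acc ++ [match stack.dropWhile (fun t => x ≤ t) with | [] => (-1 : Int) | t :: _ => t],
         x :: stack.dropWhile (fun t => x ≤ t))).1 = acc ++ pvF rp (x :: r)
    rw [he, ih _ _ (x :: rp) (pvInvStep hinv x)]
    simp [pvF]

theorem pvA_eq_F (items : List Int) : arrayPreviousLess items = pvF [] items := by
  rw [pvA_eq_map]
  have h1 : (List.range items.length).map (pvH items)
      = (List.range items.length).map (fun i => pvG ((items.take i).reverse ++ []) (items.getD i 0)) := by
    apply List.map_congr_left
    intro i hi
    rw [List.mem_range] at hi
    rw [List.append_nil]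
    exact pvA_inner items (items.getD i 0) i (by omega)
  rw [h1, pvMapRange]

theorem pvB_eq_F (items : List Int) : arrayPreviousLess_alt items = pvF [] items := by
  unfold arrayPreviousLess_alt
  rw [pvB_foldl items [] [] [] (fun x => rfl)]
  rfl

-- ===== VERDICT (by name: the statement is the Claim_ definition above) =====
theorem arrayPreviousLess_spec : Claim_equal_arrayPreviousLess := by
  intro items _
  unfold Spec_arrayPreviousLess
  rw [pvA_eq_F, pvB_eq_F]
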